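-- pv_equiv track=rewrite | github.com/fabriziomonge/goal_calculator | App.py | eurize
-- ===== SOURCE A (Python) =====
-- def eurize(numero):
--     stringa = str(numero)
--     lista = []
--     for i in range(len(stringa)):
--         lista.append(stringa[i])
--     lista.reverse()
--     stringa = lista[0]
--     for i in lista[1:]:
--         stringa=stringa+i
--     lista=[]
--     for i in range(len(stringa)):
--         if len(stringa)>3 and i == 3:
--             punto = '.'
--             lista.append(punto)
--         if len(stringa)>6 and i == 6:
--             punto = '.'
--             lista.append(punto)
--         if len(stringa)>9 and i == 9:
--             punto = '.'
--             lista.append(punto)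
--         lista.append(stringa[i])
--
--     lista.reverse()
--     out = lista[0]
--     for i in range(1,len(lista)):
--         out =out+lista[i]
--     out = out + ',00 €'
--     return(out)
-- ===== SOURCE B (Python) =====
-- def eurize(numero):
--     s = str(numero)
--     n = len(s)
--     cuts = {n - p for p in (3, 6, 9) if n > p}
--     pezzi = []
--     for i, c in enumerate(s):
--         if i in cuts:
--             pezzi.append('.')
--         pezzi.append(c)
--     return ''.join(pezzi) + ',00 €'
-- ===== Notes on version B (the rewrite author's own statement) =====
-- stated objective: simpler
-- what changed: A copies str(numero) into a list, reverses it, rebuilds the string, inserts dots while scanning the reversed string, reverses again and re-joins; B does one forward pass over enumerate(str(numero)) emitting a dot before each position in a precomputed cut set, with no reversals.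
import Mathlib
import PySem

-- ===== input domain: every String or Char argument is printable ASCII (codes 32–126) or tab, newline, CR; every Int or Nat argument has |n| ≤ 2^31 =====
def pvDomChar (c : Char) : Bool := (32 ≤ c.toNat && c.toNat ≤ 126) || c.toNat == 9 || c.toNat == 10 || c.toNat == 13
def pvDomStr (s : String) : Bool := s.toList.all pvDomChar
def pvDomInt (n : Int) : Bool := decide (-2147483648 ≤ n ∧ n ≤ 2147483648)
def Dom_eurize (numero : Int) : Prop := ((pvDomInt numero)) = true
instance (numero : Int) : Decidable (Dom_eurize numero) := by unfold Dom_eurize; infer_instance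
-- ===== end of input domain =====

-- B replaces A's two reversals and reversed-index dot insertion by a single forward
-- pass over precomputed cut positions (objective: simpler).


-- ===== PORT A =====
def eurize (numero : Int) : String :=
  let stringa : List Char := PySem.Int.toChars numero
  let lista : List Char :=
    (PySem.List.pyRange 0 (stringa.length : Int) 1).foldl
      (fun acc i => acc ++ [PySem.List.pyGetD stringa i ' ']) []
  let lista := lista.reverse
  let stringa : List Char := [PySem.List.pyGetD lista 0 ' ']
  let stringa := (PySem.List.slice lista (some 1) none).foldl
      (fun acc c => acc ++ [c]) stringa
  let lista : List Char :=
    (PySem.List.pyRange 0 (stringa.length : Int) 1).foldl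
      (fun acc i =>
        let acc := if (stringa.length : Int) > 3 ∧ i = 3 then acc ++ ['.'] else acc
        let acc := if (stringa.length : Int) > 6 ∧ i = 6 then acc ++ ['.'] else acc
        let acc := if (stringa.length : Int) > 9 ∧ i = 9 then acc ++ ['.'] else acc
        acc ++ [PySem.List.pyGetD stringa i ' ']) []
  let lista := lista.reverse
  let out : List Char := [PySem.List.pyGetD lista 0 ' ']
  let out := (PySem.List.pyRange 1 (lista.length : Int) 1).foldl
      (fun acc i => acc ++ [PySem.List.pyGetD lista i ' ']) out
  String.ofList (out ++ ",00 €".toList)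

-- ===== PORT B =====
def eurize_alt (numero : Int) : String :=
  let s : List Char := PySem.Int.toChars numero
  let n : Int := (s.length : Int)
  let cuts : PySem.Set Int :=
    PySem.Set.ofList ((([3, 6, 9] : List Int).filter (fun p => n > p)).map (fun p => n - p))
  let pezzi : List Char :=
    (PySem.List.enumerate s 0).foldl
      (fun acc ic =>
        let acc := if PySem.Set.contains cuts ic.1 then acc ++ ['.'] else acc
        acc ++ [ic.2]) []
  String.ofList (pezzi ++ ",00 €".toList)

-- ===== PRECONDITION & SPEC =====
def Spec_eurize (numero : Int) (out : String) : Prop := out = eurize_alt numero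
instance (numero : Int) (out : String) : Decidable (Spec_eurize numero out) := by unfold Spec_eurize; infer_instance

-- ===== CLAIM (what is proved, stated in full; the proofs are below) =====
def Claim_equal_eurize : Prop := ∀ (numero : Int), Dom_eurize numero → Spec_eurize numero (eurize numero)

-- ===== LEMMAS AND PROOFS =====

lemma toDigits_ne_nil (n : Nat) : Nat.toDigits 10 n ≠ [] := by
  unfold Nat.toDigits
  simp only [Nat.toDigitsCore]
  split
  · simp
  · intro h
    have := Nat.toDigitsCore_lens_eq 10 n (n / 10) (Nat.digitChar (n % 10)) []
    rw [h] at this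
    simp at this

lemma toChars_ne_nil (n : Int) : PySem.Int.toChars n ≠ [] := by
  unfold PySem.Int.toChars
  split
  · simp
  · exact toDigits_ne_nil _

-- the dots A's reversed-index loop emits before the character at reversed index i
def dotsA (n : Nat) (i : Int) : List Char :=
  (if (n : Int) > 3 ∧ i = 3 then ['.'] else []) ++
  ((if (n : Int) > 6 ∧ i = 6 then ['.'] else []) ++
   (if (n : Int) > 9 ∧ i = 9 then ['.'] else []))

-- the dot B's forward loop emits before the character at forward index i
def cutB (n : Nat) (i : Int) : List Char :=
  if ((n : Int) > 3 ∧ i = (n : Int) - 3) ∨ ((n : Int) > 6 ∧ i = (n : Int) - 6) ∨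
     ((n : Int) > 9 ∧ i = (n : Int) - 9) then ['.'] else []

lemma dotsA_reverse (n : Nat) (i : Int) : (dotsA n i).reverse = dotsA n i := by
  unfold dotsA; split_ifs <;> rfl

lemma dotsA_zero (n : Nat) : dotsA n 0 = [] := by
  simp [dotsA]

lemma dotsA_eq_cutB (n k : Nat) (_h1 : 1 ≤ k) (h2 : k < n) :
    dotsA n ((n - k : Nat) : Int) = cutB n (k : Int) := by
  have hc : ((n - k : Nat) : Int) = (n : Int) - (k : Int) := by
    push_cast [Nat.le_of_lt h2]; ring
  unfold dotsA cutB
  rw [hc]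
  split_ifs <;> first | rfl | (exfalso; omega)


lemma mem_cuts (n : Nat) (j : Int) :
    PySem.Set.contains
      (PySem.Set.ofList ((([3, 6, 9] : List Int).filter
        (fun p => (n : Int) > p)).map (fun p => (n : Int) - p))) j = true
      ↔ (((n : Int) > 3 ∧ j = (n : Int) - 3) ∨ ((n : Int) > 6 ∧ j = (n : Int) - 6) ∨
         ((n : Int) > 9 ∧ j = (n : Int) - 9)) := by
  rw [show (PySem.Set.contains
      (PySem.Set.ofList ((([3, 6, 9] : List Int).filter
        (fun p => (n : Int) > p)).map (fun p => (n : Int) - p))) j = true)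
      ↔ j ∈ (PySem.Set.ofList ((([3, 6, 9] : List Int).filter
        (fun p => (n : Int) > p)).map (fun p => (n : Int) - p))) from by
    simp [PySem.Set.contains]]
  rw [PySem.Set.mem_ofList]
  simp only [List.mem_map, List.mem_filter]
  constructor
  · rintro ⟨p, ⟨hp, hgt⟩, rfl⟩
    simp only [List.mem_cons] at hp
    simp only [decide_eq_true_eq] at hgt
    rcases hp with rfl | rfl | rfl | h
    · left; exact ⟨hgt, rfl⟩
    · right; left; exact ⟨hgt, rfl⟩
    · right; right; exact ⟨hgt, rfl⟩
    · simp at h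
  · rintro (⟨h, rfl⟩ | ⟨h, rfl⟩ | ⟨h, rfl⟩)
    · exact ⟨3, ⟨by simp, by simpa using h⟩, rfl⟩
    · exact ⟨6, ⟨by simp, by simpa using h⟩, rfl⟩
    · exact ⟨9, ⟨by simp, by simpa using h⟩, rfl⟩

lemma cutB_zero (n : Nat) (hn : 1 ≤ n) : cutB n 0 = [] := by
  unfold cutB
  rw [if_neg (by omega)]

lemma shiftFlatMap {α : Type} (a : Nat → α) (e : Nat → List α) (n : Nat) :
    List.flatMap (fun k => [a k] ++ e k) (List.range n)
      = List.flatMap (fun k => (if k = 0 then [] else e (k - 1)) ++ [a k]) (List.range n)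
        ++ (if n = 0 then [] else e (n - 1)) := by
  induction n with
  | zero => simp
  | succ m ih =>
      rw [List.range_succ, List.flatMap_append, List.flatMap_append, ih]
      simp [List.append_assoc]

lemma getD_reverse (s : List Char) (k : Nat) (hk : k < s.length) :
    s.reverse.getD (s.length - 1 - k) ' ' = s.getD k ' ' := by
  rw [List.getD_eq_getElem?_getD, List.getD_eq_getElem?_getD,
      List.getElem?_reverse (by omega)]
  congr 2
  omega

lemma core (s : List Char) (hne : s ≠ []) :
    (List.flatMap (fun i => dotsA s.length i ++ [PySem.List.pyGetD s.reverse i ' '])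
        (PySem.List.pyRange 0 (s.length : Int) 1)).reverse
      = List.flatMap (fun i => cutB s.length i ++ [PySem.List.pyGetD s i ' '])
        (PySem.List.pyRange 0 (s.length : Int) 1) := by
  have hn1 : 1 ≤ s.length := List.length_pos_of_ne_nil hne
  rw [PySem.List.pyRange_zero_nat, List.flatMap_map, List.flatMap_map]
  simp only [PySem.List.pyGetD_natCast]
  set n := s.length
  have hrr : (List.range n).reverse = List.map (fun k => n - 1 - k) (List.range n) := by
    rw [List.range_eq_range', List.reverse_range', ← List.range_eq_range']
    simp
  rw [List.reverse_flatMap, hrr, List.flatMap_map]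
  have e1 : List.flatMap
      (fun k => (List.reverse ∘ fun i : Nat => dotsA n (i : Int) ++ [s.reverse.getD i ' ']) (n - 1 - k))
      (List.range n)
      = List.flatMap (fun k => [s.getD k ' '] ++ dotsA n ((n - 1 - k : Nat) : Int)) (List.range n) := by
    refine List.flatMap_congr (fun k hk => ?_)
    have hk' : k < n := List.mem_range.mp hk
    simp only [Function.comp_apply, List.reverse_append, List.reverse_singleton,
      dotsA_reverse]
    rw [getD_reverse s k (by omega)]
  rw [e1, shiftFlatMap (fun k => s.getD k ' ') (fun k => dotsA n ((n - 1 - k : Nat) : Int)) n]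
  rw [if_neg (by omega)]
  have : (n - 1 - (n - 1) : Nat) = 0 := by omega
  rw [this]
  simp only [Nat.cast_zero, dotsA_zero, List.append_nil]
  refine List.flatMap_congr (fun k hk => ?_)
  have hk' : k < n := List.mem_range.mp hk
  by_cases h0 : k = 0
  · subst h0
    rw [if_pos rfl]
    simp only [Nat.cast_zero, cutB_zero n hn1]
  · rw [if_neg h0]
    have : (n - 1 - (k - 1) : Nat) = n - k := by omega
    rw [this, dotsA_eq_cutB n k (by omega) hk']

-- ===== VERDICT (by name: the statement is the Claim_ definition above) =====
theorem eurize_spec : Claim_equal_eurize := by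
  intro numero _hdom
  unfold Spec_eurize
  have hne : PySem.Int.toChars numero ≠ [] := toChars_ne_nil numero
  simp only [eurize, eurize_alt]
  generalize hs : PySem.Int.toChars numero = s
  rw [hs] at hne
  -- A: the first copy loop produces s itself
  rw [PySem.List.foldl_pyRange_zero_pyGetD' s ' ' (fun acc x => acc ++ [x]) []]
  rw [PySem.List.foldl_append_singleton_eq_self s []]
  simp only [List.nil_append]
  -- s.reverse is nonempty
  obtain ⟨c, t, hct⟩ : ∃ c t, s.reverse = c :: t := by
    cases h : s.reverse with
    | nil => exact absurd (by simpa using congrArg List.reverse h) hne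
    | cons c t => exact ⟨c, t, rfl⟩
  simp only [hct]
  -- A: rebuilding the reversed string char by char gives it back
  rw [PySem.List.slice_from (c :: t) (by norm_num)]
  rw [PySem.List.foldl_append_singleton_eq_self (List.drop (1:Int).toNat (c :: t))
        [PySem.List.pyGetD (c :: t) 0 ' ']]
  have hget0 : PySem.List.pyGetD (c :: t) 0 ' ' = c := by simp [pysem]
  rw [hget0]
  simp only [Int.toNat_one, List.drop_one, List.tail_cons, List.singleton_append]
  -- A: the dot-insertion loop is a flatMap
  rw [PySem.List.foldl_congr_mem (PySem.List.pyRange 0 (((c :: t).length : Int)) 1) _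
        (fun acc i => acc ++ (dotsA (c :: t).length i ++ [PySem.List.pyGetD (c :: t) i ' ']))
        [] (by
          intro acc i _
          simp only [dotsA]
          split_ifs <;> simp [List.append_assoc])]
  rw [PySem.List.foldl_append_eq_flatMap
        (fun i => dotsA (c :: t).length i ++ [PySem.List.pyGetD (c :: t) i ' '])]
  simp only [List.nil_append]
  -- A: the final copy loop gives back the reversed list
  set L := (List.flatMap (fun i => dotsA (c :: t).length i ++ [PySem.List.pyGetD (c :: t) i ' '])
      (PySem.List.pyRange 0 ((c :: t).length : Int) 1)).reverse with hLdef
  rw [PySem.List.foldl_pyRange_pyGetD' L ' ' (fun acc x => acc ++ [x]) _ (by norm_num),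
      PySem.List.foldl_append_singleton_eq_self]
  have hLne : L ≠ [] := by
    rw [hLdef, ne_eq, List.reverse_eq_nil_iff, List.flatMap_eq_nil_iff]
    intro h
    have h0mem : (0 : Int) ∈ PySem.List.pyRange 0 ((c :: t).length : Int) 1 := by
      rw [PySem.List.mem_pyRange_one]
      refine ⟨le_refl 0, ?_⟩
      simp only [List.length_cons]
      push_cast
      omega
    have := h 0 h0mem
    simp at this
  obtain ⟨d, u, hL⟩ : ∃ d u, L = d :: u := by
    cases h : L with
    | nil => exact absurd h hLne
    | cons d u => exact ⟨d, u, rfl⟩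
  rw [hL]
  have hgd0 : PySem.List.pyGetD (d :: u) 0 ' ' = d := by simp [pysem]
  rw [hgd0]
  simp only [Int.toNat_one, List.drop_one, List.tail_cons, List.singleton_append]
  rw [← hL, hLdef]
  -- B: the forward loop is a flatMap over the cut positions
  rw [PySem.List.enumerate_eq_map_pyRange s ' ', List.foldl_map]
  rw [PySem.List.foldl_congr_mem (PySem.List.pyRange 0 (PySem.List.len s) 1) _
        (fun acc j => acc ++ (cutB s.length j ++ [PySem.List.pyGetD s j ' ']))
        [] (by
          intro acc j _
          simp only []
          by_cases h : ((s.length : Int) > 3 ∧ j = (s.length : Int) - 3) ∨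
              ((s.length : Int) > 6 ∧ j = (s.length : Int) - 6) ∨
              ((s.length : Int) > 9 ∧ j = (s.length : Int) - 9)
          · rw [if_pos ((mem_cuts s.length j).mpr h)]
            simp only [cutB]
            rw [if_pos h]
            simp [List.append_assoc]
          · rw [if_neg (fun hc => h ((mem_cuts s.length j).mp hc))]
            simp only [cutB]
            rw [if_neg h]
            simp)]
  rw [PySem.List.foldl_append_eq_flatMap
        (fun j => cutB s.length j ++ [PySem.List.pyGetD s j ' '])]
  simp only [List.nil_append, PySem.List.len_eq]
  -- both sides are now the two flatMaps; conclude with `core`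
  rw [← hct]
  simp only [List.length_reverse]
  exact congrArg String.ofList (congrArg (· ++ ",00 €".toList) (core s hne))
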